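/-
  GENERATED by c/gen_labels.py from the tables of the image toy (FUNCTIONS LOOPS CHECKS insns sym; the PROGRAM only (the base is in the shared library)) and units.tsv
  -- do not edit; re-run the script when the image is rebuilt.

  `Toy.L.<function>.<label>`: a name for every code address of the image that a statement or a proof cites.
  Statements and proofs cite these names, never the numbers: a rebuild that only shifts code changes this file alone.
  Per function: entry, size (bytes), insns (instructions), cut<k> (the addresses the units table cites: segment
  entries, exits, cut points), loop<k> (loop heads), ret<k> (the return address of the k-th call), chk<k> (the call
  instruction of the k-th check site). One address may have several names.
-/
import X86.Derived.User.State
namespace Toy.L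
open X86

abbrev prog_main.entry : Word := 0x105000  -- toy.c:65 long prog_main(const unsigned char *in, long len, unsigned char *out, long cap, void *heap,…
abbrev prog_main.size : Nat := 188  -- bytes of code: 0x105000 .. 0x1050bc
abbrev prog_main.insns : Nat := 42  -- instructions
abbrev prog_main.cut1 : Word := 0x10504d  -- mov DWORD PTR [rbx+0xc00000],0x0 | cut in prog_main | toy.c:65 long prog_main(const unsigned char *in,…
abbrev prog_main.cut2 : Word := 0x10506f  -- mov r12,rdi | cut in prog_main | toy.c:80 }
abbrev prog_main.ret1 : Word := 0x10508f  -- after the call at 0x10508a of clamp_length | toy.c:75 n = clamp_length(len);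
abbrev prog_main.ret2 : Word := 0x1050a2  -- after the call at 0x10509d of fill_buffer | toy.c:76 fill_buffer(buffer, in, n);
abbrev prog_main.ret3 : Word := 0x1050aa  -- after the call at 0x1050a5 of weighted_sum | toy.c:77 sum = weighted_sum(buffer);
abbrev prog_main.ret4 : Word := 0x1050b5  -- after the call at 0x1050b0 of store_sum | toy.c:78 store_sum(out, sum);

abbrev clamp_length.entry : Word := 0x105180  -- toy.c:28 if (len < 0) {
abbrev clamp_length.size : Nat := 27  -- bytes of code: 0x105180 .. 0x10519b
abbrev clamp_length.insns : Nat := 10  -- instructions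

abbrev weighted_sum.entry : Word := 0x105220  -- toy.c:44 static __attribute__((noinline)) unsigned long weighted_sum(const unsigned char *buffer) {
abbrev weighted_sum.size : Nat := 98  -- bytes of code: 0x105220 .. 0x105282
abbrev weighted_sum.insns : Nat := 30  -- instructions
abbrev weighted_sum.cut1 : Word := 0x105270  -- cmp rbx,0x3f | cut in weighted_sum | toy.c:50 for (i = 0; i < BUFFER_BYTES; i++) {
abbrev weighted_sum.loop1 : Word := 0x105270  -- loop head: cmp rbx,0x3f | toy.c:50 for (i = 0; i < BUFFER_BYTES; i++) {
abbrev weighted_sum.ret1 : Word := 0x105244  -- after the call at 0x10523f of __asan_load1_noabort | toy.c:52 sum = sum + (unsigned long) buffer[i]…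
abbrev weighted_sum.ret2 : Word := 0x10525c  -- after the call at 0x105257 of __asan_load1_noabort | toy.c:52 sum = sum + (unsigned long) buffer[i]…
abbrev weighted_sum.chk1 : Word := 0x10523f  -- call __asan_load1_noabort; then movzx ebp,BYTE PTR [rbp+0x0] | toy.c:52 sum = sum + (unsigned long)…
abbrev weighted_sum.chk2 : Word := 0x105257  -- call __asan_load1_noabort; then movzx eax,BYTE PTR [r12+0x141200] | toy.c:52 sum = sum + (unsigned…

abbrev store_sum.entry : Word := 0x105320  -- toy.c:58 static __attribute__((noinline)) void store_sum(unsigned char *out, unsigned long sum) {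
abbrev store_sum.size : Nat := 69  -- bytes of code: 0x105320 .. 0x105365
abbrev store_sum.insns : Nat := 26  -- instructions
abbrev store_sum.cut1 : Word := 0x105357  -- cmp ebx,0x7 | cut in store_sum | toy.c:60 for (k = 0; k < 8; k++) {
abbrev store_sum.loop1 : Word := 0x105357  -- loop head: cmp ebx,0x7 | toy.c:60 for (k = 0; k < 8; k++) {
abbrev store_sum.ret1 : Word := 0x105350  -- after the call at 0x10534b of __asan_store1_noabort | toy.c:61 out[k] = (unsigned char) (sum >> (8 * k…
abbrev store_sum.chk1 : Word := 0x10534b  -- call __asan_store1_noabort; then mov BYTE PTR [rbp+0x0],r12b | toy.c:61 out[k] = (unsigned char) (sum…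

abbrev fill_buffer.entry : Word := 0x105400  -- toy.c:38 static __attribute__((noinline)) void fill_buffer(unsigned char *buffer, const unsigned ch…
abbrev fill_buffer.size : Nat := 48  -- bytes of code: 0x105400 .. 0x105430
abbrev fill_buffer.insns : Nat := 15  -- instructions
abbrev fill_buffer.ret1 : Word := 0x105411  -- after the call at 0x10540c of memcpy | toy.c:39 memcpy(buffer, in, (size_t) n);
abbrev fill_buffer.ret2 : Word := 0x105429  -- after the call at 0x105424 of memset | toy.c:40 memset(buffer + n, fill_byte, (size_t) (BUFFER_BYTES…

abbrev _sub_I_65535_1.entry : Word := 0x1054c0  -- toy.c:80 }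
abbrev _sub_I_65535_1.size : Nat := 24  -- bytes of code: 0x1054c0 .. 0x1054d8
abbrev _sub_I_65535_1.insns : Nat := 6  -- instructions
abbrev _sub_I_65535_1.ret1 : Word := 0x1054d3  -- after the call at 0x1054ce of __asan_register_globals | toy.c:80 }

end Toy.L

-- Sanity checks: a wrong generator fails the build here.
example : Toy.L.prog_main.entry = 0x105000 := by decide
example : Toy.L.prog_main.cut1 = 0x10504d := by decide
example : Toy.L.weighted_sum.loop1 = 0x105270 := by decide
example : Toy.L.prog_main.ret1 = 0x10508f := by decide
example : Toy.L.weighted_sum.chk1 = 0x10523f := by decide
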